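-- pv_equiv track=rewrite | github.com/ThisIsHwang/for-PS | 프로그래머스/퍼즐 조각 채우기.py | returnRotatedBlocks
-- ===== SOURCE A (Python) =====
-- def returnRotatedBlocks(one_block):
--     return_blocks = [one_block]
--     # 90 degrees
--     for _ in range(3):
--         min_x = float("inf")
--         min_y = float("inf")
--         temp_block = []
--         for point in return_blocks[-1]:
--             min_y = min(min_y, point[1])
--             min_x = min(min_x, -point[0])
--             temp_block.append((point[1], -point[0]))
--         return_blocks.append(tuple((x - min_y, y- min_x) for x, y in temp_block))
--
--     return tuple(return_blocks)
-- ===== SOURCE B (Python) =====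
-- def returnRotatedBlocks(one_block):
--     # Closed-form rotations: each of the 3 blocks is computed directly from the
--     # original (rotate k times, then normalize once), no chaining through the
--     # previously produced block.
--     def rotk(k, p):
--         x, y = p
--         return [(x, y), (y, -x), (-x, -y), (-y, x)][k]
--
--     def normalize(pts):
--         if not pts:
--             return ()
--         mx = min(p[0] for p in pts)
--         my = min(p[1] for p in pts)
--         return tuple((x - mx, y - my) for x, y in pts)
--
--     return (one_block,) + tuple(
--         normalize([rotk(k, p) for p in one_block]) for k in (1, 2, 3)
--     )
-- ===== Notes on version B (the rewrite author's own statement) =====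
-- stated objective: alternative
-- what changed: A produces each rotation by chaining: rotate the previously normalized block and track running minima in one fused loop; B computes each of the three blocks directly from the original via the closed-form k-fold 90-degree rotation (x,y)->(y,-x)->(-x,-y)->(-y,x) and then normalizes once with separate min reductions, relying on translation-invariance of normalization.
import Mathlib
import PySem

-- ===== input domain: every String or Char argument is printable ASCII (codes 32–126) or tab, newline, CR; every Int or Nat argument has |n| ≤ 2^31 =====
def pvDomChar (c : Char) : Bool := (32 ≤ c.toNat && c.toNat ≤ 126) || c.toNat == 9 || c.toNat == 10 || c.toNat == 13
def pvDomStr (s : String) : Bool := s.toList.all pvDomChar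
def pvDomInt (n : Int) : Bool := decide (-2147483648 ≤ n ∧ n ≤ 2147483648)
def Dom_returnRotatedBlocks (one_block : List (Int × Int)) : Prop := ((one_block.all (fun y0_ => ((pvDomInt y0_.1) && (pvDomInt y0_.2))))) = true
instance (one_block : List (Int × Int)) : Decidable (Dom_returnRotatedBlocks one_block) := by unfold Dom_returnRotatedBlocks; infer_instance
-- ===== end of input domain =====

-- B replaces A's chained rotate-and-normalize (fused loop with running minima) by
-- closed-form k-fold rotations of the original block followed by one normalization
-- with separate min reductions (objective: alternative decomposition, same cost).

-- ===== PORT A =====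
-- Python's running minimum starts at float('inf'); modeled as Option Int (none = inf),
-- `min(inf, v) = v`.  The `getD 0` defaults below are never reached: the mins are
-- only subtracted when temp_block is nonempty, and then both minima are `some`.
def pvOptMin (o : Option Int) (v : Int) : Option Int :=
  some (match o with | none => v | some m => min m v)

-- the body of A's `for _ in range(3)` iteration: one fused pass computing
-- min_y, min_x and temp_block, then the normalizing comprehension
def pvStepA (pts : List (Int × Int)) : List (Int × Int) :=
  let st := pts.foldl
    (fun (st : Option Int × Option Int × List (Int × Int)) point =>
      (pvOptMin st.1 (-point.1),            -- min_x = min(min_x, -point[0])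
       pvOptMin st.2.1 point.2,             -- min_y = min(min_y, point[1])
       st.2.2 ++ [(point.2, -point.1)]))    -- temp_block.append((point[1], -point[0]))
    (none, none, [])
  st.2.2.map (fun q => (q.1 - (st.2.1.getD 0), q.2 - (st.1.getD 0)))

def returnRotatedBlocks (one_block : List (Int × Int)) : List (List (Int × Int)) :=
  (List.range 3).foldl
    (fun acc _ => acc ++ [pvStepA ((acc.getLast?).getD [])])
    [one_block]

-- ===== PORT B =====
-- Source B's rotk: index k of the list of the four 90°-rotations of p
def pvRotK (k : Nat) (p : Int × Int) : Int × Int :=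
  [(p.1, p.2), (p.2, -p.1), (-p.1, -p.2), (-p.2, p.1)].getD k (0, 0)

-- Source B's normalize: two separate min reductions, then the shifting comprehension
def pvNormalize (pts : List (Int × Int)) : List (Int × Int) :=
  if pts = [] then []
  else
    let mx := ((pts.map Prod.fst).min?).getD 0
    let my := ((pts.map Prod.snd).min?).getD 0
    pts.map (fun q => (q.1 - mx, q.2 - my))

def returnRotatedBlocks_alt (one_block : List (Int × Int)) : List (List (Int × Int)) :=
  [one_block] ++ ([1, 2, 3].map (fun k => pvNormalize (one_block.map (pvRotK k))))

-- ===== PRECONDITION & SPEC =====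
def Spec_returnRotatedBlocks (one_block : List (Int × Int)) (out : List (List (Int × Int))) : Prop := out = returnRotatedBlocks_alt one_block
instance (one_block : List (Int × Int)) (out : List (List (Int × Int))) : Decidable (Spec_returnRotatedBlocks one_block out) := by unfold Spec_returnRotatedBlocks; infer_instance

-- ===== CLAIM (what is proved, stated in full; the proofs are below) =====
def Claim_equal_returnRotatedBlocks : Prop := ∀ (one_block : List (Int × Int)), Dom_returnRotatedBlocks one_block → Spec_returnRotatedBlocks one_block (returnRotatedBlocks one_block)

-- ===== LEMMAS AND PROOFS =====


-- running-min helper facts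
theorem optMin_some (x : Int) (xs : List Int) :
    List.foldl pvOptMin (some x) xs = some (List.foldl min x xs) := by
  induction xs generalizing x with
  | nil => rfl
  | cons y ys ih => simp [List.foldl, pvOptMin, ih]

theorem optMin_none_min? (xs : List Int) :
    List.foldl pvOptMin none xs = xs.min? := by
  cases xs with
  | nil => rfl
  | cons x xs => simp [List.foldl, pvOptMin, optMin_some, List.min?]

-- characterization of A's fused loop, generalized over the accumulator
theorem foldA_char (l : List (Int × Int)) (mx my : Option Int) (t : List (Int × Int)) :
    l.foldl
      (fun (st : Option Int × Option Int × List (Int × Int)) point =>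
        (pvOptMin st.1 (-point.1), pvOptMin st.2.1 point.2, st.2.2 ++ [(point.2, -point.1)]))
      (mx, my, t)
    = ((l.map (fun p => -p.1)).foldl pvOptMin mx,
       (l.map Prod.snd).foldl pvOptMin my,
       t ++ l.map (fun p => (p.2, -p.1))) := by
  induction l generalizing mx my t with
  | nil => simp
  | cons p ps ih => simp [List.foldl, ih]

theorem pvStepA_eq_norm_rot1 (l : List (Int × Int)) :
    pvStepA l = pvNormalize (l.map (pvRotK 1)) := by
  cases l with
  | nil => rfl
  | cons p ps =>
    simp only [pvStepA, foldA_char, optMin_none_min?, List.nil_append]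
    have h1 : ((p :: ps).map (pvRotK 1)).map Prod.fst = (p :: ps).map Prod.snd :=
      by rw [List.map_map]; exact List.map_congr_left (fun q _ => rfl)
    have h2 : ((p :: ps).map (pvRotK 1)).map Prod.snd = (p :: ps).map (fun q => -q.1) :=
      by rw [List.map_map]; exact List.map_congr_left (fun q _ => rfl)
    have h3 : (p :: ps).map (fun q : Int × Int => (q.2, -q.1)) = (p :: ps).map (pvRotK 1) := rfl
    simp only [h3, pvNormalize, h1, h2]
    simp

-- min? commutes with adding a constant
theorem foldl_min_add (x a : Int) (xs : List Int) :
    List.foldl min (x + a) (xs.map (fun v => v + a)) = List.foldl min x xs + a := by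
  induction xs generalizing x with
  | nil => rfl
  | cons y ys ih =>
    simp only [List.map, List.foldl]
    rw [min_add_add_right]
    exact ih (min x y)

theorem min?_map_add (xs : List Int) (a : Int) :
    (xs.map (fun v => v + a)).min? = xs.min?.map (fun v => v + a) := by
  cases xs with
  | nil => rfl
  | cons x xs => simp [List.min?, foldl_min_add]

-- normalization is invariant under translation
theorem norm_translate (l : List (Int × Int)) (a b : Int) :
    pvNormalize (l.map (fun q => (q.1 + a, q.2 + b))) = pvNormalize l := by
  cases l with
  | nil => rfl
  | cons p ps =>
    simp only [pvNormalize, if_neg (by simp : ¬((p :: ps).map (fun q : Int × Int => (q.1 + a, q.2 + b)) = [])),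
      if_neg (by simp : ¬(p :: ps = []))]
    have h1 : ((p :: ps).map (fun q : Int × Int => (q.1 + a, q.2 + b))).map Prod.fst
        = ((p :: ps).map Prod.fst).map (fun v => v + a) := by
      rw [List.map_map, List.map_map]; rfl
    have h2 : ((p :: ps).map (fun q : Int × Int => (q.1 + a, q.2 + b))).map Prod.snd
        = ((p :: ps).map Prod.snd).map (fun v => v + b) := by
      rw [List.map_map, List.map_map]; rfl
    rw [h1, h2, min?_map_add, min?_map_add, List.map_map]
    cases hx : ((p :: ps).map Prod.fst).min? with
    | none => simp [List.min?] at hx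
    | some mx =>
      cases hy : ((p :: ps).map Prod.snd).min? with
      | none => simp [List.min?] at hy
      | some my =>
        simp only [Option.map_some, Option.getD_some]
        apply List.map_congr_left
        intro q _
        simp only [Function.comp]
        simp

theorem norm_rot1_norm (m : List (Int × Int)) :
    pvNormalize ((pvNormalize m).map (pvRotK 1)) = pvNormalize (m.map (pvRotK 1)) := by
  cases m with
  | nil => rfl
  | cons p ps =>
    have hm : pvNormalize (p :: ps)
        = (p :: ps).map (fun q => (q.1 - (((p :: ps).map Prod.fst).min?.getD 0),
                                   q.2 - (((p :: ps).map Prod.snd).min?.getD 0))) := by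
      simp only [pvNormalize, if_neg (by simp : ¬(p :: ps = []))]
    set mx := ((p :: ps).map Prod.fst).min?.getD 0 with hmx
    set my := ((p :: ps).map Prod.snd).min?.getD 0 with hmy
    have hcomp : (pvNormalize (p :: ps)).map (pvRotK 1)
        = ((p :: ps).map (pvRotK 1)).map (fun q => (q.1 + (-my), q.2 + mx)) := by
      rw [hm]
      simp only [List.map_map]
      apply List.map_congr_left
      intro q _
      simp only [Function.comp, pvRotK, List.getD]
      simp
      constructor <;> ring
    rw [hcomp, norm_translate]

-- ===== VERDICT (by name: the statement is the Claim_ definition above) =====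
theorem returnRotatedBlocks_spec : Claim_equal_returnRotatedBlocks := by
  intro ob _
  unfold Spec_returnRotatedBlocks
  have h : returnRotatedBlocks ob
      = [ob, pvStepA ob, pvStepA (pvStepA ob), pvStepA (pvStepA (pvStepA ob))] := rfl
  have r11 : ∀ l : List (Int × Int), (l.map (pvRotK 1)).map (pvRotK 1) = l.map (pvRotK 2) := by
    intro l; rw [List.map_map]; exact List.map_congr_left (fun q _ => by simp [pvRotK])
  have r12 : ∀ l : List (Int × Int), (l.map (pvRotK 2)).map (pvRotK 1) = l.map (pvRotK 3) := by
    intro l; rw [List.map_map]; exact List.map_congr_left (fun q _ => by simp [pvRotK])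
  have s1 : pvStepA ob = pvNormalize (ob.map (pvRotK 1)) := pvStepA_eq_norm_rot1 ob
  have s2 : pvStepA (pvStepA ob) = pvNormalize (ob.map (pvRotK 2)) := by
    rw [s1, pvStepA_eq_norm_rot1, norm_rot1_norm, r11]
  have s3 : pvStepA (pvStepA (pvStepA ob)) = pvNormalize (ob.map (pvRotK 3)) := by
    rw [s2, pvStepA_eq_norm_rot1, norm_rot1_norm, r12]
  rw [h, s3, s2, s1]
  rfl
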